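-- pv_equiv track=rewrite | github.com/ednussi/Intro-to-CS | Ex9/hzlib.py | build_canonical_codebook
-- ===== SOURCE A (Python) =====
-- LENGTH = 0
--
-- KEY = 0
--
-- LEN_VALUE_TUPLE = 1
--
-- def build_canonical_codebook(codebook):
--     """ This function creates a cannonical huffman codebook, by
--     taking a normal huffman codebook and change it to a
--     cannonical represntation
--
--     Arguments:
--     codebook - a dict of the normal huffman codebook
--
--     Return
--     a dict - represnting the cannonical codebook of the huffman tree
--     """
--
--
--     # sorts the codebook into list
--     sorted_codebook = [item for item in codebook.items()]
--     sorted_codebook.sort(key=lambda node: (node[LEN_VALUE_TUPLE][LENGTH], node[KEY]))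
--
--     # for each item calculate its value and insert into dictionary
--     current_binary_value = 0
--     for item in range(len(sorted_codebook)):
--         #calculate the binary value of the item
--         item_binary_value = bin(current_binary_value)[2:]
--         # adds '0' in the end of the number in case it is not 8 length number
--         item_binary_value += '0' * abs(
--             sorted_codebook[item - 1][LEN_VALUE_TUPLE][LENGTH] -
--             sorted_codebook[item][LEN_VALUE_TUPLE][LENGTH])
--         # turn the binary code into its representive number
--         current_binary_value = int(item_binary_value, 2)
--         # insert in the item's place in the dictionary, tuple with
--         # calculated num and increase the current binary value
--         sorted_codebook[item] = (sorted_codebook[item][KEY],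
--                                  (sorted_codebook[item][LEN_VALUE_TUPLE][LENGTH],
--                                   current_binary_value))
--         current_binary_value += 1
--
--     return dict(sorted_codebook)
-- ===== SOURCE B (Python) =====
-- def build_canonical_codebook(codebook):
--     """Canonical Huffman codebook via the classic two-pass scheme:
--     histogram of code lengths, per-length starting codes, then one
--     assignment pass giving consecutive codes inside each length group."""
--     items = sorted(codebook.items(), key=lambda kv: (kv[1][0], kv[0]))
--
--     # pass 1a: histogram of code lengths
--     bl_count = {}
--     for _key, (length, _value) in items:
--         bl_count[length] = bl_count.get(length, 0) + 1
--
--     # pass 1b: starting code for each length, over the sorted distinct lengths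
--     next_code = {}
--     code = 0
--     prev = None
--     for length in sorted(bl_count):
--         if prev is not None:
--             code = (code + bl_count[prev]) << (length - prev)
--         next_code[length] = code
--         prev = length
--
--     # pass 2: assign consecutive codes within each length group
--     out = {}
--     for key, (length, _value) in items:
--         out[key] = (length, next_code[length])
--         next_code[length] += 1
--     return out
-- ===== Notes on version B (the rewrite author's own statement) =====
-- stated objective: alternative
-- what changed: A walks the sorted items once, re-deriving each code by formatting the running counter with bin(), padding it with '0' characters for the length gap and re-parsing it with int(.,2); B uses the classic two-pass canonical-Huffman construction: a histogram of code lengths, a per-length starting-code table built over the sorted distinct lengths with integer shifts, then one assignment pass handing out consecutive codes inside each length group.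
import Mathlib
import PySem

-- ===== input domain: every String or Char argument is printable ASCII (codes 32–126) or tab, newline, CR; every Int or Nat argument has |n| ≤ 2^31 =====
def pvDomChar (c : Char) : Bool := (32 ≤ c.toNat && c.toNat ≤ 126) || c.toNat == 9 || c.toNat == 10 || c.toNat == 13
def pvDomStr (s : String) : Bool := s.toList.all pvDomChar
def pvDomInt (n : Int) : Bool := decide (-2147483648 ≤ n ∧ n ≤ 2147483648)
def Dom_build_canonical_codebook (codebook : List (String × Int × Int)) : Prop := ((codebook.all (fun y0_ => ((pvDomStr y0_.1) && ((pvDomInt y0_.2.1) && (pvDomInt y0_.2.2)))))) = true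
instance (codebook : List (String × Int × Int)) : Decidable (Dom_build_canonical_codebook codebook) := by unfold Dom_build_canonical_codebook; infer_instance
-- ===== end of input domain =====

-- B replaces A's per-item bin()-string shifting by the classic two-pass canonical-Huffman
-- scheme (length histogram, per-length starting codes, then one assignment pass).

-- ===== PORT A =====
-- one iteration of A's `for item in range(len(sorted_codebook))` loop; state = (sorted_codebook, current_binary_value)
def pvStepA (st : List (String × Int × Int) × Int) (item : Nat) : List (String × Int × Int) × Int :=
  match PySem.List.pyGet? st.1 ((item : Int) - 1), PySem.List.pyGet? st.1 (item : Int) with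
  | some prev, some curr =>
      -- bin(c)[2:] + '0' * k, re-parsed by int(·, 2), is exactly c * 2 ^ k for the loop's
      -- counter c (c is 0 initially and int(·, 2) of a '0'/'1' string afterwards, so c ≥ 0)
      let v := st.2 * 2 ^ (prev.2.1 - curr.2.1).natAbs
      (st.1.set item (curr.1, curr.2.1, v), v + 1)
  | _, _ => st   -- unreachable: both indices are within Python's (negative-wrapping) range

def build_canonical_codebook (codebook : List (String × Int × Int)) : List (String × Int × Int) :=
  let sorted_codebook := PySem.List.sorted2 (PySem.Dict.ofList codebook).items
    (fun node => node.2.1) (fun node => node.1)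
  let final := (List.range sorted_codebook.length).foldl pvStepA (sorted_codebook, 0)
  (PySem.Dict.ofList final.1).items

-- ===== PORT B =====
-- pass 1b step: state = (next_code, code, prev)
def pvStep1 (bl_count : PySem.Dict Int Int) (st : PySem.Dict Int Int × Int × Option Int)
    (length : Int) : PySem.Dict Int Int × Int × Option Int :=
  let code := match st.2.2 with
    | none => st.2.1
    -- `<<`: the shift amount is ≥ 0 (consecutive distinct sorted lengths), so .toNat is exact
    | some prev => (st.2.1 + bl_count.getD prev 0) <<< (length - prev).toNat
  (st.1.insert length code, code, some length)

-- pass 2 step: state = (out, next_code)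
def pvStepB (st : PySem.Dict String (Int × Int) × PySem.Dict Int Int)
    (kv : String × Int × Int) : PySem.Dict String (Int × Int) × PySem.Dict Int Int :=
  let c := st.2.getD kv.2.1 0
  (st.1.insert kv.1 (kv.2.1, c), st.2.insert kv.2.1 (c + 1))

def build_canonical_codebook_alt (codebook : List (String × Int × Int)) : List (String × Int × Int) :=
  let items := PySem.List.sorted2 (PySem.Dict.ofList codebook).items
    (fun kv => kv.2.1) (fun kv => kv.1)
  -- pass 1a: histogram of code lengths
  let bl_count : PySem.Dict Int Int :=
    items.foldl (fun d kv => d.modify kv.2.1 0 (· + 1)) PySem.Dict.empty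
  -- pass 1b: starting code for each length, over the sorted distinct lengths
  let pass1 := (PySem.List.sorted bl_count.keys (fun x => x)).foldl (pvStep1 bl_count)
    (PySem.Dict.empty, 0, none)
  -- pass 2: assign consecutive codes within each length group
  let final := items.foldl pvStepB (PySem.Dict.empty, pass1.1)
  final.1.items

-- ===== PRECONDITION & SPEC =====
def Spec_build_canonical_codebook (codebook : List (String × Int × Int)) (out : List (String × Int × Int)) : Prop := out = build_canonical_codebook_alt codebook
instance (codebook : List (String × Int × Int)) (out : List (String × Int × Int)) : Decidable (Spec_build_canonical_codebook codebook out) := by unfold Spec_build_canonical_codebook; infer_instance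

-- ===== CLAIM (what is proved, stated in full; the proofs are below) =====
def Claim_equal_build_canonical_codebook : Prop := ∀ (codebook : List (String × Int × Int)), Dom_build_canonical_codebook codebook → Spec_build_canonical_codebook codebook (build_canonical_codebook codebook)

-- ===== LEMMAS AND PROOFS =====

-- the common code-assignment recurrence over the sorted list: state = (counter, previous length);
-- returns (assigned list, final counter)
def pvSpec : Int → Int → List (String × Int × Int) → List (String × Int × Int) × Int
  | cur, _, [] => ([], cur)
  | cur, prevLen, p :: rest =>
      let c := cur * 2 ^ (prevLen - p.2.1).natAbs
      let r := pvSpec (c + 1) p.2.1 rest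
      ((p.1, p.2.1, c) :: r.1, r.2)

-- the code pvSpec assigns to the first element of length L
def pvFC : Int → Int → List (String × Int × Int) → Int → Int
  | _, _, [], _ => 0
  | cur, prevLen, p :: rest, L =>
      let c := cur * 2 ^ (prevLen - p.2.1).natAbs
      if p.2.1 = L then c else pvFC (c + 1) p.2.1 rest L

lemma pvSpec_map_fst (cur prevLen : Int) (S : List (String × Int × Int)) :
    (pvSpec cur prevLen S).1.map (·.1) = S.map (·.1) := by
  induction S generalizing cur prevLen with
  | nil => rfl
  | cons p rest ih => simp [pvSpec, ih]

-- sorted2 with first key = length yields nondecreasing lengths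
lemma pvInsertBy_pairwise (x : String × Int × Int) (ys : List (String × Int × Int))
    (h : ys.Pairwise (fun a b => a.2.1 ≤ b.2.1)) :
    (PySem.List.insertBy (fun a b =>
        decide (a.2.1 < b.2.1) || !decide (b.2.1 < a.2.1) && decide (a.1 < b.1)) x ys).Pairwise
      (fun a b => a.2.1 ≤ b.2.1) := by
  induction ys with
  | nil => simp [PySem.List.insertBy]
  | cons y ys ih =>
    rw [List.pairwise_cons] at h
    by_cases hb : (decide (x.2.1 < y.2.1) || !decide (y.2.1 < x.2.1) && decide (x.1 < y.1)) = true
    · rw [PySem.List.insertBy, if_pos hb]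
      have hxy : x.2.1 ≤ y.2.1 := by
        rcases Bool.or_eq_true_iff.mp hb with h1 | h1
        · exact le_of_lt (of_decide_eq_true h1)
        · have := Bool.and_eq_true_iff.mp h1
          have : ¬ (y.2.1 < x.2.1) := by
            have hh := this.1; simpa using hh
          omega
      refine List.pairwise_cons.mpr ⟨?_, List.pairwise_cons.mpr h⟩
      intro z hz
      rcases List.mem_cons.mp hz with rfl | hz
      · exact hxy
      · exact le_trans hxy (h.1 z hz)
    · rw [PySem.List.insertBy, if_neg hb]
      have hyx : y.2.1 ≤ x.2.1 := by
        have h1 : ¬ (x.2.1 < y.2.1) := fun hlt => hb (by simp [hlt])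
        omega
      refine List.pairwise_cons.mpr ⟨?_, ih h.2⟩
      intro z hz
      rcases (PySem.List.insertBy_mem_iff ..).mp hz with rfl | hz
      · exact hyx
      · exact h.1 z hz

lemma pvSorted2_pairwise (xs : List (String × Int × Int)) :
    (PySem.List.sorted2 xs (fun p => p.2.1) (fun p => p.1)).Pairwise
      (fun a b => a.2.1 ≤ b.2.1) := by
  rw [PySem.List.sorted2]
  simp only [if_neg (by decide : ¬ (false = true))]
  suffices h : ∀ (l : List (String × Int × Int)) (acc : List (String × Int × Int)),
      acc.Pairwise (fun a b => a.2.1 ≤ b.2.1) →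
      (l.foldl (fun acc x => PySem.List.insertBy (fun a b =>
        decide (a.2.1 < b.2.1) || !decide (b.2.1 < a.2.1) && decide (a.1 < b.1)) x acc) acc).Pairwise
        (fun a b => a.2.1 ≤ b.2.1) by
    exact h xs [] (by simp)
  intro l
  induction l with
  | nil => intro acc h; simpa using h
  | cons x t ih => intro acc h; exact ih _ (pvInsertBy_pairwise x acc h)

-- dict(pairs).items() is pairs when the keys are distinct
lemma pvItems_ofList (l : List (String × Int × Int)) (h : (l.map (·.1)).Nodup) :
    (PySem.Dict.ofList l).items = l := by
  rw [PySem.Dict.ofList, PySem.Dict.update]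
  rw [PySem.Dict.items_foldl_insert_fresh l (fun p => p.1) (fun p => p.2) PySem.Dict.empty
    (by intro a _; simp [PySem.Dict.contains_empty]) h]
  have h0 : (PySem.Dict.empty : PySem.Dict String (Int × Int)).items = [] := rfl
  rw [h0]
  simp

-- A's index loop, after the first iteration: invariant over the remaining indices
lemma pvLoopA (todo : List (String × Int × Int)) :
    ∀ (done : List (String × Int × Int)) (cur : Int) (h : done ≠ []),
    (List.range' done.length todo.length).foldl pvStepA (done ++ todo, cur)
      = (done ++ (pvSpec cur (done.getLast h).2.1 todo).1,
         (pvSpec cur (done.getLast h).2.1 todo).2) := by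
  induction todo with
  | nil => intro done cur h; simp [pvSpec]
  | cons p rest ih =>
    intro done cur h
    have hlen : 0 < done.length := List.length_pos_iff.mpr h
    simp only [List.length_cons]
    rw [List.range'_succ, List.foldl_cons]
    have hstep : pvStepA (done ++ p :: rest, cur) done.length
        = ((done ++ [(p.1, p.2.1, cur * 2 ^ ((done.getLast h).2.1 - p.2.1).natAbs)]) ++ rest,
           cur * 2 ^ ((done.getLast h).2.1 - p.2.1).natAbs + 1) := by
      have hidx : ((done.length : Int) - 1) = ((done.length - 1 : Nat) : Int) := by omega
      have hget1 : PySem.List.pyGet? (done ++ p :: rest) ((done.length : Int) - 1)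
          = some (done.getLast h) := by
        rw [hidx, PySem.List.pyGet?_natCast,
          List.getElem?_append_left (by omega), List.getLast_eq_getElem]
        simp
      have hget2 : PySem.List.pyGet? (done ++ p :: rest) ((done.length : Int))
          = some p := by
        rw [PySem.List.pyGet?_natCast, List.getElem?_append_right (le_refl _)]
        simp
      rw [pvStepA, hget1, hget2]
      simp only [List.set_append, if_neg (by omega : ¬ done.length < done.length),
        Nat.sub_self, List.set_cons_zero, List.append_assoc, List.singleton_append]
    rw [hstep]
    have hne : done ++ [(p.1, p.2.1, cur * 2 ^ ((done.getLast h).2.1 - p.2.1).natAbs)] ≠ [] := by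
      simp
    have hlast := List.getLast_append_singleton (l := done)
      (a := (p.1, p.2.1, cur * 2 ^ ((done.getLast h).2.1 - p.2.1).natAbs))
    have := ih (done ++ [(p.1, p.2.1, cur * 2 ^ ((done.getLast h).2.1 - p.2.1).natAbs)])
      (cur * 2 ^ ((done.getLast h).2.1 - p.2.1).natAbs + 1) hne
    rw [List.length_append, List.length_singleton] at this
    rw [this]
    simp only [hlast, pvSpec, List.append_assoc, List.singleton_append]

-- A's whole loop computes pvSpec (any initial previous length: the first code is 0 either way)
lemma pvLoopA_full (S : List (String × Int × Int)) :
    ((List.range S.length).foldl pvStepA (S, 0)).1 = (pvSpec 0 0 S).1 := by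
  cases S with
  | nil => simp [pvSpec]
  | cons p rest =>
    rw [List.range_eq_range']
    have h1 : List.range' 0 (p :: rest).length = 0 :: List.range' 1 rest.length := by
      rw [List.length_cons, List.range'_succ]
    rw [h1, List.foldl_cons]
    have hstep : pvStepA (p :: rest, 0) 0
        = (([(p.1, p.2.1, 0)] : List (String × Int × Int)) ++ rest, 1) := by
      have hget1 : PySem.List.pyGet? (p :: rest) ((0 : Nat) - 1 : Int)
          = some ((p :: rest).getLast (by simp)) := by
        simp only [Nat.cast_zero, zero_sub]
        rw [List.getLast_eq_getElem]
        simp only [PySem.List.pyGet?, PySem.List.pyIdx?]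
        rw [if_neg (by norm_num), if_pos (by simp)]
        show (p :: rest)[(p :: rest).length - (- -1).toNat]? = _
        norm_num
        exact rfl
      have hget2 : PySem.List.pyGet? (p :: rest) ((0 : Nat) : Int) = some p := by
        rw [PySem.List.pyGet?_natCast]; rfl
      rw [pvStepA, hget1, hget2]
      simp
    rw [hstep]
    have := pvLoopA rest [(p.1, p.2.1, 0)] 1 (by simp)
    simp only [List.length_singleton, List.getLast_singleton] at this
    rw [this]
    simp [pvSpec]

-- skipping a block of equal-length items advances pvFC's counter by the block size
lemma pvFC_group (L L' : Int) (hne : L' ≠ L) :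
    ∀ (G : List (String × Int × Int)) (S' : List (String × Int × Int)) (cur : Int),
    (∀ g ∈ G, g.2.1 = L) →
    pvFC cur L (G ++ S') L' = pvFC (cur + G.length) L S' L' := by
  intro G
  induction G with
  | nil => intro S' cur _; simp
  | cons g G' ih =>
    intro S' cur hG
    have hg : g.2.1 = L := hG g (by simp)
    rw [List.cons_append, pvFC]
    simp only [hg, sub_self, Int.natAbs_zero, pow_zero, mul_one]
    rw [if_neg (fun e => hne e.symm)]
    rw [ih S' (cur + 1) (fun x hx => hG x (by simp [hx]))]
    congr 1
    simp only [List.length_cons]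
    push_cast
    ring

-- splitting a nondecreasing list at its head length
lemma pvPeel (L : Int) (p : String × Int × Int) (rest : List (String × Int × Int))
    (hasc : (p :: rest).Pairwise (fun a b => a.2.1 ≤ b.2.1)) (hp : p.2.1 = L) :
    ∃ G S'', p :: rest = G ++ S'' ∧ G ≠ [] ∧ (∀ g ∈ G, g.2.1 = L) ∧
      (∀ q ∈ S'', L < q.2.1) ∧
      (((p :: rest).map (·.2.1)).count L : Int) = G.length := by
  have hgt : ∀ q ∈ (p :: rest).dropWhile (fun q => q.2.1 == L), L < q.2.1 := by
    intro q hq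
    rcases hd : (p :: rest).dropWhile (fun q => q.2.1 == L) with _ | ⟨h0, t0⟩
    · rw [hd] at hq; simp at hq
    · have hS : p :: rest = (p :: rest).takeWhile (fun q => q.2.1 == L) ++ (h0 :: t0) := by
        rw [← hd, List.takeWhile_append_dropWhile]
      have hh0 : ¬ (h0.2.1 = L) := by
        have := List.head?_dropWhile_not (p := fun q => q.2.1 == L) (l := p :: rest)
        rw [hd] at this
        simpa using this
      have hpairs : ((p :: rest).takeWhile (fun q => q.2.1 == L) ++ (h0 :: t0)).Pairwise
          (fun a b => a.2.1 ≤ b.2.1) := by rw [← hS]; exact hasc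
      have hmemh0 : h0 ∈ p :: rest := by rw [hS]; simp
      have hple : ∀ x ∈ rest, p.2.1 ≤ x.2.1 := (List.pairwise_cons.mp hasc).1
      have hLh0 : L ≤ h0.2.1 := by
        rcases List.mem_cons.mp hmemh0 with rfl | hm
        · omega
        · have := hple h0 hm; omega
      have hLh0' : L < h0.2.1 := lt_of_le_of_ne hLh0 (fun e => hh0 e.symm)
      have hpair2 : (h0 :: t0).Pairwise (fun a b => a.2.1 ≤ b.2.1) :=
        (List.pairwise_append.mp hpairs).2.1
      rw [hd] at hq
      rcases List.mem_cons.mp hq with rfl | hm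
      · exact hLh0'
      · have := (List.pairwise_cons.mp hpair2).1 q hm; omega
  refine ⟨(p :: rest).takeWhile (fun q => q.2.1 == L),
          (p :: rest).dropWhile (fun q => q.2.1 == L),
          (List.takeWhile_append_dropWhile).symm, ?_, ?_, hgt, ?_⟩
  · rw [List.takeWhile_cons, if_pos (by simp [hp])]
    simp
  · intro g hg
    simpa using List.mem_takeWhile_imp hg
  · have hsplit : (p :: rest).map (·.2.1)
        = ((p :: rest).takeWhile (fun q => q.2.1 == L)).map (·.2.1)
          ++ ((p :: rest).dropWhile (fun q => q.2.1 == L)).map (·.2.1) := by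
      rw [← List.map_append, List.takeWhile_append_dropWhile]
    rw [hsplit, List.count_append]
    have h1 : (((p :: rest).takeWhile (fun q => q.2.1 == L)).map (·.2.1)).count L
        = (((p :: rest).takeWhile (fun q => q.2.1 == L)).map (·.2.1)).length := by
      rw [List.count_eq_length]
      intro b hb
      rcases List.mem_map.mp hb with ⟨g, hg, rfl⟩
      have := List.mem_takeWhile_imp hg
      simpa using (by simpa using this : g.2.1 = L).symm
    have h2 : (((p :: rest).dropWhile (fun q => q.2.1 == L)).map (·.2.1)).count L = 0 := by
      rw [List.count_eq_zero]
      intro hmem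
      rcases List.mem_map.mp hmem with ⟨g, hg, he⟩
      have := hgt g hg
      omega
    rw [h1, h2]
    simp [List.length_map]

-- B's pass 2, against the common recurrence: nc holds the first code of each remaining length
lemma pvPass2 (S : List (String × Int × Int)) :
    ∀ (out : PySem.Dict String (Int × Int)) (nc : PySem.Dict Int Int) (cur prevLen : Int),
    S.Pairwise (fun a b => a.2.1 ≤ b.2.1) →
    (∀ p ∈ S, out.contains p.1 = false) →
    (S.map (·.1)).Nodup →
    (∀ L ∈ S.map (·.2.1), nc.getD L 0 = pvFC cur prevLen S L) →
    (S.foldl pvStepB (out, nc)).1.items = out.items ++ (pvSpec cur prevLen S).1 := by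
  induction S with
  | nil => intro out nc cur prevLen _ _ _ _; simp [pvSpec]
  | cons p rest ih =>
    intro out nc cur prevLen hasc hfresh hnod hnc
    have hc : nc.getD p.2.1 0 = cur * 2 ^ (prevLen - p.2.1).natAbs := by
      have := hnc p.2.1 (by simp)
      rw [pvFC, if_pos rfl] at this
      exact this
    have hple : ∀ x ∈ rest, p.2.1 ≤ x.2.1 := (List.pairwise_cons.mp hasc).1
    have hnod' : (p.1 :: rest.map (·.1)).Nodup := by
      rw [List.map_cons] at hnod; exact hnod
    have hpf : p.1 ∉ rest.map (·.1) := (List.nodup_cons.mp hnod').1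
    rw [List.foldl_cons]
    have hstep : pvStepB (out, nc) p
        = (out.insert p.1 (p.2.1, cur * 2 ^ (prevLen - p.2.1).natAbs),
           nc.insert p.2.1 (cur * 2 ^ (prevLen - p.2.1).natAbs + 1)) := by
      rw [pvStepB]; rw [hc]
    rw [hstep]
    rw [ih (out.insert p.1 (p.2.1, cur * 2 ^ (prevLen - p.2.1).natAbs))
          (nc.insert p.2.1 (cur * 2 ^ (prevLen - p.2.1).natAbs + 1))
          (cur * 2 ^ (prevLen - p.2.1).natAbs + 1) p.2.1
          ((List.pairwise_cons.mp hasc).2)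
          ?_ ?_ ?_]
    · rw [PySem.Dict.items_insert_of_not_contains _ _ (hfresh p (by simp))]
      rw [pvSpec]
      simp [List.append_assoc]
    · -- freshness survives the insert
      intro q hq
      rw [PySem.Dict.contains_insert]
      have hqf : q.1 ≠ p.1 := by
        intro e
        exact hpf (e ▸ List.mem_map_of_mem hq)
      simp only [Bool.or_eq_false_iff]
      exact ⟨by simpa using hqf, hfresh q (by simp [hq])⟩
    · exact (List.nodup_cons.mp hnod').2
    · -- the next_code invariant is preserved
      intro L hL
      by_cases hLp : L = p.2.1
      · subst hLp
        rw [PySem.Dict.getD_insert_self]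
        rcases List.mem_map.mp hL with ⟨q, hq, hqL⟩
        cases rest with
        | nil => simp at hq
        | cons q0 rest' =>
          have h1 : q0.2.1 ≤ p.2.1 := by
            rcases List.mem_cons.mp hq with rfl | hm
            · omega
            · have := (List.pairwise_cons.mp (List.pairwise_cons.mp hasc).2).1 q hm
              omega
          have h2 : p.2.1 ≤ q0.2.1 := hple q0 (by simp)
          have hq0 : q0.2.1 = p.2.1 := le_antisymm h1 h2
          rw [pvFC, if_pos hq0, hq0]
          simp
      · rw [PySem.Dict.getD_insert_of_ne _ _ _ hLp]
        have hmem : L ∈ (p :: rest).map (·.2.1) := by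
          rw [List.map_cons]
          exact List.mem_cons.mpr (Or.inr hL)
        rw [hnc L hmem, pvFC, if_neg (fun e => hLp e.symm)]

-- the fold state cursor of pass 1b: the pvFC counter it stands for
def pvCur (bl : PySem.Dict Int Int) (code : Int) : Option Int → Int
  | none => 0
  | some pr => code + bl.getD pr 0

-- the head of a nondecreasing list carries the smallest listed length
lemma pvHeadLen (L : Int) (lensT : List Int) (S : List (String × Int × Int))
    (hasc : S.Pairwise (fun a b => a.2.1 ≤ b.2.1))
    (hlp : (L :: lensT).Pairwise (· < ·))
    (h3 : ∀ L', L' ∈ L :: lensT ↔ L' ∈ S.map (·.2.1)) :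
    ∃ p rest, S = p :: rest ∧ p.2.1 = L := by
  have hmem : L ∈ S.map (·.2.1) := (h3 L).mp (by simp)
  cases S with
  | nil => simp at hmem
  | cons p rest =>
    refine ⟨p, rest, rfl, ?_⟩
    have h1 : p.2.1 ≤ L := by
      rcases List.mem_map.mp hmem with ⟨q, hq, hqL⟩
      rcases List.mem_cons.mp hq with rfl | hm
      · omega
      · have := (List.pairwise_cons.mp hasc).1 q hm
        omega
    have h2 : L ≤ p.2.1 := by
      have hp : p.2.1 ∈ L :: lensT := (h3 p.2.1).mpr (by simp)
      rcases List.mem_cons.mp hp with e | hm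
      · omega
      · have := (List.pairwise_cons.mp hlp).1 _ hm
        omega
    omega

-- B's pass 1b computes, for each listed length, the first code pvFC assigns to it
lemma pvPass1go (lens : List Int) :
    ∀ (S : List (String × Int × Int)) (code : Int) (prevOpt : Option Int)
      (nc : PySem.Dict Int Int) (bl : PySem.Dict Int Int),
    S.Pairwise (fun a b => a.2.1 ≤ b.2.1) →
    lens.Pairwise (· < ·) →
    (∀ L, L ∈ lens ↔ L ∈ S.map (·.2.1)) →
    (∀ pr, prevOpt = some pr → ∀ L ∈ lens, pr < L) →
    (prevOpt = none → code = 0) →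
    (∀ L ∈ lens, bl.getD L 0 = ((S.map (·.2.1)).count L : Int)) →
    ∀ L₀ : Int,
      ((lens.foldl (pvStep1 bl) (nc, code, prevOpt)).1).getD L₀ 0
        = if L₀ ∈ lens then pvFC (pvCur bl code prevOpt) (prevOpt.getD 0) S L₀
          else nc.getD L₀ 0 := by
  induction lens with
  | nil => intro S code prevOpt nc bl _ _ _ _ _ _ L₀; simp
  | cons L lensT ih =>
    intro S code prevOpt nc bl hasc hlp h3 hsome hnone hbl L₀
    obtain ⟨p, rest, rfl, hp⟩ := pvHeadLen L lensT S hasc hlp h3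
    obtain ⟨G, S'', hGS, hGne, hGlen, hSgt, hcount⟩ := pvPeel L p rest hasc hp
    have hLlt : ∀ L'' ∈ lensT, L < L'' := (List.pairwise_cons.mp hlp).1
    have hLnotT : L ∉ lensT := fun hm => absurd (hLlt L hm) (lt_irrefl L)
    have hSmap : (p :: rest).map (·.2.1) = G.map (·.2.1) ++ S''.map (·.2.1) := by
      rw [← List.map_append, ← hGS]
    -- the code computed for L is pvFC's code for the first element
    have hstate : pvStep1 bl (nc, code, prevOpt) L
        = (nc.insert L (pvCur bl code prevOpt * 2 ^ ((prevOpt.getD 0) - L).natAbs),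
           pvCur bl code prevOpt * 2 ^ ((prevOpt.getD 0) - L).natAbs, some L) := by
      cases prevOpt with
      | none =>
        rw [pvStep1]
        simp [pvCur, hnone rfl]
      | some pr =>
        have hpr : pr < L := hsome pr rfl L (by simp)
        rw [pvStep1]
        simp only [pvCur, Option.getD_some]
        rw [Int.shiftLeft_eq]
        have he : (L - pr).toNat = (pr - L).natAbs := by omega
        rw [he]
    rw [List.foldl_cons, hstate]
    set cur := pvCur bl code prevOpt with hcur
    set pl := prevOpt.getD 0 with hpl
    set c' := cur * 2 ^ (pl - L).natAbs with hc'
    have hbl'' : ∀ L'' ∈ lensT, bl.getD L'' 0 = (((S''.map (·.2.1)).count L'') : Int) := by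
      intro L'' hm
      have hne : L'' ≠ L := fun e => absurd (e ▸ hLlt L'' hm) (lt_irrefl L)
      rw [hbl L'' (by simp [hm]), hSmap, List.count_append]
      have h0 : (G.map (·.2.1)).count L'' = 0 := by
        rw [List.count_eq_zero]
        intro hmm
        rcases List.mem_map.mp hmm with ⟨g, hg, e⟩
        exact hne (e ▸ (hGlen g hg) ▸ rfl)
      rw [h0]
      simp
    have h3'' : ∀ L'', L'' ∈ lensT ↔ L'' ∈ S''.map (·.2.1) := by
      intro L''
      constructor
      · intro hm
        have hne : L'' ≠ L := fun e => absurd (e ▸ hLlt L'' hm) (lt_irrefl L)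
        have : L'' ∈ (p :: rest).map (·.2.1) := (h3 L'').mp (by simp [hm])
        rw [hSmap] at this
        rcases List.mem_append.mp this with hg | hs
        · rcases List.mem_map.mp hg with ⟨g, hgm, e⟩
          exact absurd (e ▸ (hGlen g hgm) ▸ rfl) hne
        · exact hs
      · intro hm
        rcases List.mem_map.mp hm with ⟨q, hq, e⟩
        have hgt : L < L'' := e ▸ hSgt q hq
        have : L'' ∈ L :: lensT := (h3 L'').mpr (by rw [hSmap]; exact List.mem_append.mpr (Or.inr hm))
        rcases List.mem_cons.mp this with e' | hm'
        · omega
        · exact hm'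
    have hasc'' : S''.Pairwise (fun a b => a.2.1 ≤ b.2.1) := by
      have := hGS ▸ hasc
      exact (List.pairwise_append.mp this).2.1
    have hIH := ih S'' c' (some L) (nc.insert L c') bl hasc''
      ((List.pairwise_cons.mp hlp).2) h3''
      (fun pr e L'' hm => by injection e with e'; exact e' ▸ hLlt L'' hm)
      (fun e => absurd e (by simp))
      hbl'' L₀
    rw [hIH]
    have hblL : bl.getD L 0 = (G.length : Int) := by
      rw [hbl L (by simp), ← hcount]
    by_cases hL0 : L₀ = L
    · subst hL0
      rw [if_neg hLnotT, PySem.Dict.getD_insert_self, if_pos (by simp)]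
      rw [pvFC, if_pos hp, hp]
    · by_cases hmT : L₀ ∈ lensT
      · rw [if_pos hmT, if_pos (by simp [hmT])]
        have hneL : L₀ ≠ L := hL0
        cases G with
        | nil => exact absurd rfl hGne
        | cons g G' =>
          have hinj := (List.cons.injEq p rest g (G' ++ S'')).mp (by rw [hGS, List.cons_append])
          obtain ⟨hpg, hrest⟩ := hinj
          subst hpg
          rw [hrest, pvFC]
          rw [if_neg (by rw [hp]; exact fun e => hL0 e.symm)]
          rw [hp, ← hc']
          rw [pvFC_group L L₀ hL0 G' S'' _ (fun x hx => hGlen x (by simp [hx]))]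
          simp only [pvCur]
          congr 1
          have hG1 : (G'.length : Int) + 1 = ((p :: G').length : Int) := by
            simp [List.length_cons]
          have := hblL
          omega
      · rw [if_neg hmT, if_neg (by simp [hL0, hmT])]
        exact PySem.Dict.getD_insert_of_ne _ _ _ hL0

-- ===== VERDICT (by name: the statement is the Claim_ definition above) =====
theorem build_canonical_codebook_spec : Claim_equal_build_canonical_codebook := by
  intro codebook _
  unfold Spec_build_canonical_codebook
  simp only [build_canonical_codebook, build_canonical_codebook_alt]
  set S := PySem.List.sorted2 (PySem.Dict.ofList codebook).items
    (fun node => node.2.1) (fun node => node.1) with hSdef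
  have hperm : S.Perm (PySem.Dict.ofList codebook).items := by
    rw [hSdef]; exact PySem.List.sorted2_perm _ _ _ _
  have hkeys : ((PySem.Dict.ofList codebook).items.map (·.1)).Nodup := by
    have := PySem.Dict.nodup_keys_ofList (ps := codebook)
    simpa [PySem.Dict.keys] using this
  have hnodS : (S.map (·.1)).Nodup := ((hperm.map (·.1)).nodup_iff).mpr hkeys
  have hasc : S.Pairwise (fun a b => a.2.1 ≤ b.2.1) := by
    rw [hSdef]; exact pvSorted2_pairwise _
  -- A's side
  rw [pvLoopA_full S]
  rw [pvItems_ofList _ (by rw [pvSpec_map_fst]; exact hnodS)]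
  -- B's side: the histogram
  set bl : PySem.Dict Int Int := S.foldl (fun d kv => PySem.Dict.modify d kv.2.1 0 (· + 1)) PySem.Dict.empty with hbl
  have hblgetD : ∀ L : Int, bl.getD L 0 = (((S.map (·.2.1)).count L) : Int) := by
    intro L
    rw [hbl, ← List.foldl_map (f := fun kv : String × Int × Int => kv.2.1)
      (g := fun d x => PySem.Dict.modify d x 0 (· + 1))]
    rw [PySem.Dict.getD_foldl_modify_add_one]
    simp [PySem.Dict.getD_empty]
  have hkeysbl : bl.keys = PySem.Set.ofList (S.map (·.2.1)) := by
    rw [hbl]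
    rw [PySem.Dict.keys_foldl_modify_key S (fun kv => kv.2.1) 0 (fun _ _ => (· + 1))
      PySem.Dict.empty]
    rw [PySem.Set.ofList_eq_foldl]
    rfl
  set lens := PySem.List.sorted bl.keys (fun x => x) with hlens
  have hlensp : lens.Pairwise (· < ·) := by
    rw [hlens, hkeysbl]; exact PySem.List.sorted_ofList_pairwise_lt _
  have hlensm : ∀ L, L ∈ lens ↔ L ∈ S.map (·.2.1) := by
    intro L
    rw [hlens, (PySem.List.sorted_perm bl.keys (fun x => x) false).mem_iff, hkeysbl,
      PySem.Set.mem_ofList]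
  have hnc : ∀ L ∈ S.map (·.2.1),
      ((lens.foldl (pvStep1 bl) (PySem.Dict.empty, 0, none)).1).getD L 0 = pvFC 0 0 S L := by
    intro L hm
    have := pvPass1go lens S 0 none PySem.Dict.empty bl hasc hlensp hlensm
      (fun pr e => absurd e (by simp)) (fun _ => rfl) (fun L' _ => hblgetD L') L
    rw [this, if_pos ((hlensm L).mpr hm)]
    rfl
  rw [pvPass2 S PySem.Dict.empty
    ((lens.foldl (pvStep1 bl) (PySem.Dict.empty, 0, none)).1) 0 0 hasc
    (fun p _ => PySem.Dict.contains_empty _) hnodS hnc]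
  have h0 : (PySem.Dict.empty : PySem.Dict String (Int × Int)).items = [] := rfl
  rw [h0]
  simp
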